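-- pv_equiv track=rewrite | github.com/xbmc/notrobro | notrobro-detector/methods.py | get_common_intro
-- ===== SOURCE A (Python) =====
-- def get_common_intro(l1, l2):
--     subarray = []
--     indices = []
--     len1, len2 = len(l1), len(l2)
--     for i in range(len1):
--         for j in range(len2):
--             temp = 0
--             cur_array = []
--             cur_indices = []
--             # hamming distance
--             while ((i+temp < len1) and (j+temp < len2) and (l1[i+temp]-l2[j+temp]) <= 30):
--                 cur_array.append(l2[j+temp])
--                 cur_indices.append((i+temp, j+temp))
--                 temp += 1
--             if (len(cur_array) > len(subarray)):
--                 subarray = cur_array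
--                 indices = cur_indices
--     # return subarray, indices
--     return indices
-- ===== SOURCE B (Python) =====
-- def get_common_intro(l1, l2):
--     n, m = len(l1), len(l2)
--     # dp[i][j] = length of the run starting at (i, j); built bottom-up
--     dp = [[0] * (m + 1) for _ in range(n + 1)]
--     for i in range(n - 1, -1, -1):
--         for j in range(m - 1, -1, -1):
--             if l1[i] - l2[j] <= 30:
--                 dp[i][j] = 1 + dp[i + 1][j + 1]
--     best, bi, bj = 0, 0, 0
--     for i in range(n):
--         for j in range(m):
--             if dp[i][j] > best:
--                 best, bi, bj = dp[i][j], i, j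
--     return [(bi + t, bj + t) for t in range(best)]
-- ===== Notes on version B (the rewrite author's own statement) =====
-- stated objective: faster
-- what changed: Replaces A's re-scan of the whole diagonal run from every (i,j) pair with a bottom-up suffix DP table dp[i][j] = 1 + dp[i+1][j+1] plus a row-major first-strict-max scan, rebuilding the index list from (best, bi, bj).
import Mathlib
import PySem

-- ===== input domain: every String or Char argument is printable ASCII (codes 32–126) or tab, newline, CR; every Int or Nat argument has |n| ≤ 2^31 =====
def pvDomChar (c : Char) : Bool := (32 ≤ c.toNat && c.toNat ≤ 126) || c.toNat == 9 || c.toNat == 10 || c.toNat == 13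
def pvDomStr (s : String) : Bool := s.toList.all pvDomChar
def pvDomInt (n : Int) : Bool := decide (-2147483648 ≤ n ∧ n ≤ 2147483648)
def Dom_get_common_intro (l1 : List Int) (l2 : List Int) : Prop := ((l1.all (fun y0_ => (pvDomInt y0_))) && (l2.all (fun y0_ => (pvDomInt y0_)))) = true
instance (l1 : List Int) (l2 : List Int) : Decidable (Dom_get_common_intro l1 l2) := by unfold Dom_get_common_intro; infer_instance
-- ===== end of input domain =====

-- B replaces A's O(n·m·L) rescan-from-every-pair search with a bottom-up suffix DP table
-- (dp[i][j] = 1 + dp[i+1][j+1]) and a row-major first-strict-max scan: same result, O(n·m).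

-- ===== PORT A =====
-- A's inner while loop (indices i+temp, j+temp are always in range when read, so getD is exact)
def runA (l1 l2 : List Int) (i j t : Nat) : List Int × List (Int × Int) :=
  if i + t < l1.length ∧ j + t < l2.length ∧ l1.getD (i + t) 0 - l2.getD (j + t) 0 ≤ 30 then
    let rest := runA l1 l2 i j (t + 1)
    (l2.getD (j + t) 0 :: rest.1, (((i + t : Nat) : Int), ((j + t : Nat) : Int)) :: rest.2)
  else ([], [])
termination_by l1.length - (i + t)
decreasing_by omega

def get_common_intro (l1 : List Int) (l2 : List Int) : List (Int × Int) :=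
  ((List.range l1.length).foldl (fun (st : List Int × List (Int × Int)) i =>
    (List.range l2.length).foldl (fun st j =>
      let cur := runA l1 l2 i j 0
      if cur.1.length > st.1.length then cur else st) st)
    ([], [])).2

-- ===== PORT B =====
-- one DP row (length m+1, trailing 0) from the value l1[i] and the next row
def buildRow (a : Int) : List Int → List Nat → List Nat
  | b :: bs, _ :: xs => (if a - b ≤ 30 then 1 + xs.headD 0 else 0) :: buildRow a bs xs
  | _, _ => [0]

-- all DP rows for i = 0 .. n (bottom-up over the suffixes of l1)
def dpRows (l2 : List Int) : List Int → List (List Nat)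
  | [] => [List.replicate (l2.length + 1) 0]
  | a :: as =>
    let rest := dpRows l2 as
    buildRow a l2 (rest.headD []) :: rest

def get_common_intro_alt (l1 : List Int) (l2 : List Int) : List (Int × Int) :=
  let table := dpRows l2 l1
  let best := (List.range l1.length).foldl (fun (st : Nat × Nat × Nat) i =>
    (List.range l2.length).foldl (fun (st : Nat × Nat × Nat) j =>
      let v := (table.getD i []).getD j 0
      if v > st.1 then (v, i, j) else st) st) (0, 0, 0)
  (List.range best.1).map (fun t => (((best.2.1 + t : Nat) : Int), ((best.2.2 + t : Nat) : Int)))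

-- ===== PRECONDITION & SPEC =====
def Spec_get_common_intro (l1 : List Int) (l2 : List Int) (out : List (Int × Int)) : Prop := out = get_common_intro_alt l1 l2
instance (l1 : List Int) (l2 : List Int) (out : List (Int × Int)) : Decidable (Spec_get_common_intro l1 l2 out) := by unfold Spec_get_common_intro; infer_instance

-- ===== CLAIM (what is proved, stated in full; the proofs are below) =====
def Claim_equal_get_common_intro : Prop := ∀ (l1 : List Int) (l2 : List Int), Dom_get_common_intro l1 l2 → Spec_get_common_intro l1 l2 (get_common_intro l1 l2)

-- ===== LEMMAS AND PROOFS =====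

-- run length starting at (i, j), as A's while loop computes it
def R (l1 l2 : List Int) (i j : Nat) : Nat := (runA l1 l2 i j 0).2.length

-- structural run length from the heads of two lists
def L : List Int → List Int → Nat
  | [], _ => 0
  | _ :: _, [] => 0
  | a :: as, b :: bs => if a - b ≤ 30 then L as bs + 1 else 0

lemma runA_shift (l1 l2 : List Int) (i j t : Nat) :
    runA l1 l2 i j (t + 1) = runA l1 l2 (i + 1) (j + 1) t := by
  induction hn : l1.length - (i + t + 1) generalizing t with
  | zero =>
    conv_lhs => rw [runA]
    conv_rhs => rw [runA]
    have h1 : ¬ (i + (t + 1) < l1.length) := by omega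
    have h2 : ¬ (i + 1 + t < l1.length) := by omega
    simp [h1, h2]
  | succ n ih =>
    conv_lhs => rw [runA]
    conv_rhs => rw [runA]
    have h1 : i + (t + 1) = i + 1 + t := by omega
    have h2 : j + (t + 1) = j + 1 + t := by omega
    rw [h1, h2, ih (t + 1) (by omega)]

lemma runA_fst_len (l1 l2 : List Int) (i j t : Nat) :
    (runA l1 l2 i j t).1.length = (runA l1 l2 i j t).2.length := by
  induction hn : l1.length - (i + t) generalizing t with
  | zero =>
    rw [runA]; have : ¬ (i + t < l1.length) := by omega
    simp [this]
  | succ n ih =>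
    rw [runA]; split
    · simp [ih (t + 1) (by omega)]
    · simp

lemma R_rec (l1 l2 : List Int) (i j : Nat) :
    R l1 l2 i j =
      if i < l1.length ∧ j < l2.length ∧ l1.getD i 0 - l2.getD j 0 ≤ 30
      then R l1 l2 (i + 1) (j + 1) + 1 else 0 := by
  unfold R
  conv_lhs => rw [runA]
  simp only [Nat.add_zero]
  split
  · simp [runA_shift l1 l2 i j 0]
  · simp

lemma runA_snd (l1 l2 : List Int) (i j : Nat) :
    (runA l1 l2 i j 0).2 =
      (List.range (R l1 l2 i j)).map (fun t => (((i + t : Nat) : Int), ((j + t : Nat) : Int))) := by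
  induction hn : l1.length - i generalizing i j with
  | zero =>
    have h : ¬ (i + 0 < l1.length) := by omega
    have hR : R l1 l2 i j = 0 := by
      rw [R_rec]; simp [show ¬ i < l1.length by omega]
    rw [runA, hR]; simp [show ¬ i < l1.length from by omega]
  | succ n ih =>
    conv_lhs => rw [runA]
    rw [R_rec]
    simp only [Nat.add_zero]
    split
    · rw [runA_shift l1 l2 i j 0, ih (i + 1) (j + 1) (by omega)]
      rw [List.range_succ_eq_map]
      simp only [List.map_cons, List.map_map]
      congr 1
      apply List.map_congr_left
      intro t _
      simp only [Function.comp]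
      simp only [Prod.mk.injEq]
      constructor <;> · push_cast; ring
    · simp

lemma R_eq_L (l1 l2 : List Int) : ∀ (i j : Nat), R l1 l2 i j = L (l1.drop i) (l2.drop j) := by
  intro i
  induction hn : l1.length - i generalizing i with
  | zero =>
    intro j
    rw [R_rec]
    have h1 : ¬ (i < l1.length) := by omega
    have h2 : l1.drop i = [] := List.drop_eq_nil_of_le (by omega)
    rw [h2]; simp [h1, L]
  | succ n ih =>
    intro j
    rw [R_rec]
    have hlt : i < l1.length := by omega
    have hd1 : l1.drop i = l1[i] :: l1.drop (i + 1) := List.drop_eq_getElem_cons hlt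
    by_cases hj : j < l2.length
    · have hd2 : l2.drop j = l2[j] :: l2.drop (j + 1) := List.drop_eq_getElem_cons hj
      rw [hd1, hd2, L]
      have hg1 : l1.getD i 0 = l1[i] := List.getD_eq_getElem l1 0 hlt
      have hg2 : l2.getD j 0 = l2[j] := List.getD_eq_getElem l2 0 hj
      rw [hg1, hg2]
      by_cases hc : l1[i] - l2[j] ≤ 30
      · rw [if_pos ⟨hlt, hj, hc⟩, if_pos hc, ih (i + 1) (by omega) (j + 1)]
      · rw [if_neg (by tauto), if_neg hc]
    · have hd2 : l2.drop j = [] := List.drop_eq_nil_of_le (by omega)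
      rw [hd1, hd2]
      rw [if_neg (by tauto)]
      rfl

lemma buildRow_length (a : Int) : ∀ (l2 : List Int) (nx : List Nat),
    nx.length = l2.length + 1 → (buildRow a l2 nx).length = l2.length + 1 := by
  intro l2
  induction l2 with
  | nil => intro nx _; rfl
  | cons b bs ih =>
    intro nx hlen
    match nx with
    | x :: xs =>
      show (_ :: buildRow a bs xs).length = _
      simp only [List.length_cons]
      rw [ih xs (by simpa using hlen)]

lemma buildRow_getD (a : Int) : ∀ (l2 : List Int) (nx : List Nat) (j : Nat),
    nx.length = l2.length + 1 →
    (buildRow a l2 nx).getD j 0 =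
      if j < l2.length ∧ a - l2.getD j 0 ≤ 30 then nx.getD (j + 1) 0 + 1 else 0 := by
  intro l2
  induction l2 with
  | nil =>
    intro nx j _
    show ([0] : List Nat).getD j 0 = _
    cases j <;> simp
  | cons b bs ih =>
    intro nx j hlen
    match nx with
    | x :: xs =>
      show ((if a - b ≤ 30 then 1 + xs.headD 0 else 0) :: buildRow a bs xs).getD j 0 = _
      cases j with
      | zero =>
        match xs with
        | y :: ys =>
          simp only [List.getD_cons_zero, List.length_cons, List.getD_cons_succ, List.headD_cons]
          by_cases hc : a - b ≤ 30 <;> simp [hc, Nat.add_comm]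
      | succ k =>
        simp only [List.getD_cons_succ, List.length_cons]
        rw [ih xs k (by simpa using hlen)]
        by_cases hk : k < bs.length ∧ a - bs.getD k 0 ≤ 30
        · rw [if_pos hk, if_pos ⟨by omega, by simpa using hk.2⟩]
        · rw [if_neg hk, if_neg (fun h => hk ⟨by omega, by simpa using h.2⟩)]

lemma dpRows_length (l2 : List Int) : ∀ (l1 : List Int), (dpRows l2 l1).length = l1.length + 1 := by
  intro l1
  induction l1 with
  | nil => rw [dpRows]; rfl
  | cons a as ih => rw [dpRows]; simp [ih]

lemma dpRows_row_length (l2 : List Int) : ∀ (l1 : List Int) (r : List Nat),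
    r ∈ dpRows l2 l1 → r.length = l2.length + 1 := by
  intro l1
  induction l1 with
  | nil =>
    intro r hr
    rw [dpRows] at hr
    simp at hr
    simp [hr]
  | cons a as ih =>
    intro r hr
    rw [dpRows] at hr
    simp only [List.mem_cons] at hr
    rcases hr with hr | hr
    · subst hr
      apply buildRow_length
      have hne : dpRows l2 as ≠ [] := by
        have := dpRows_length l2 as; intro h; rw [h] at this; simp at this
      have hmem : (dpRows l2 as).headD [] ∈ dpRows l2 as := by
        cases h : dpRows l2 as with
        | nil => exact absurd h hne
        | cons x xs => simp
      exact ih _ hmem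
    · exact ih _ hr

lemma dp_cell (l2 : List Int) : ∀ (l1 : List Int) (i j : Nat), i ≤ l1.length →
    ((dpRows l2 l1).getD i []).getD j 0 = L (l1.drop i) (l2.drop j) := by
  intro l1
  induction l1 with
  | nil =>
    intro i j hi
    have hi0 : i = 0 := by simpa using hi
    subst hi0
    rw [dpRows]
    simp only [List.getD_cons_zero, List.drop_nil]
    rw [show L [] (l2.drop j) = 0 from rfl]
    by_cases hj : j < l2.length + 1
    · rw [List.getD_eq_getElem _ _ (by simpa using hj)]; simp
    · rw [List.getD_eq_default]; simp; omega
  | cons a as ih =>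
    intro i j hi
    rw [dpRows]
    cases i with
    | succ k =>
      simp only [List.getD_cons_succ]
      exact ih k j (by simpa using hi)
    | zero =>
      simp only [List.getD_cons_zero, List.drop_zero]
      have hne : dpRows l2 as ≠ [] := by
        have := dpRows_length l2 as; intro h; rw [h] at this; simp at this
      have hmem : (dpRows l2 as).headD [] ∈ dpRows l2 as := by
        cases h : dpRows l2 as with
        | nil => exact absurd h hne
        | cons x xs => simp
      rw [buildRow_getD a l2 _ j (dpRows_row_length l2 as _ hmem)]
      have hhead : (dpRows l2 as).headD [] = (dpRows l2 as).getD 0 [] := by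
        cases h : dpRows l2 as with
        | nil => exact absurd h hne
        | cons x xs => simp
      by_cases hj : j < l2.length
      · have hd2 : l2.drop j = l2[j] :: l2.drop (j + 1) := List.drop_eq_getElem_cons hj
        have hg2 : l2.getD j 0 = l2[j] := List.getD_eq_getElem l2 0 hj
        rw [hd2, L, hg2]
        by_cases hc : a - l2[j] ≤ 30
        · rw [if_pos ⟨hj, hc⟩, if_pos hc, hhead, ih 0 (j + 1) (by omega)]
          simp
        · rw [if_neg (fun h => hc h.2), if_neg hc]
      · rw [if_neg (by tauto)]
        have hd2 : l2.drop j = [] := List.drop_eq_nil_of_le (by omega)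
        rw [hd2]
        rfl

-- the output list B rebuilds from a (best, bi, bj) triple
def mkOut (b : Nat × Nat × Nat) : List (Int × Int) :=
  (List.range b.1).map (fun t => (((b.2.1 + t : Nat) : Int), ((b.2.2 + t : Nat) : Int)))

-- simulation relation between A's (subarray, indices) state and B's (best, bi, bj) state
def Phi (a : List Int × List (Int × Int)) (b : Nat × Nat × Nat) : Prop :=
  a.1.length = b.1 ∧ a.2 = mkOut b

-- generic two-state simulation through foldl (step hypothesis only for members)
lemma foldl_sim {α β γ : Type} (Φ : α → β → Prop) (f : α → γ → α) (g : β → γ → β) :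
    ∀ (l : List γ), (∀ a b c, c ∈ l → Φ a b → Φ (f a c) (g b c)) →
    ∀ (a : α) (b : β), Φ a b → Φ (l.foldl f a) (l.foldl g b) := by
  intro l
  induction l with
  | nil => intro _ a b hab; exact hab
  | cons c cs ih =>
    intro h a b hab
    exact ih (fun a b c' hc' => h a b c' (List.mem_cons_of_mem _ hc'))
      _ _ (h a b c (List.mem_cons_self) hab)

lemma inner_step (l1 l2 : List Int) (i : Nat) (hi : i ≤ l1.length)
    (a : List Int × List (Int × Int)) (b : Nat × Nat × Nat) (j : Nat) (hab : Phi a b) :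
    Phi (if (runA l1 l2 i j 0).1.length > a.1.length then runA l1 l2 i j 0 else a)
        (if ((dpRows l2 l1).getD i []).getD j 0 > b.1
         then (((dpRows l2 l1).getD i []).getD j 0, i, j) else b) := by
  have hcell : ((dpRows l2 l1).getD i []).getD j 0 = (runA l1 l2 i j 0).1.length := by
    rw [dp_cell l2 l1 i j hi, ← R_eq_L, runA_fst_len]; rfl
  obtain ⟨hlen, hout⟩ := hab
  rw [hcell, hlen]
  by_cases hgt : (runA l1 l2 i j 0).1.length > b.1
  · rw [if_pos hgt, if_pos hgt]
    refine ⟨rfl, ?_⟩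
    show (runA l1 l2 i j 0).2 =
      (List.range (runA l1 l2 i j 0).1.length).map
        (fun t => (((i + t : Nat) : Int), ((j + t : Nat) : Int)))
    rw [runA_fst_len]
    exact runA_snd l1 l2 i j
  · rw [if_neg hgt, if_neg hgt]
    exact ⟨hlen, hout⟩

theorem get_common_intro_spec : Claim_equal_get_common_intro := by
  intro l1 l2 _
  unfold Spec_get_common_intro get_common_intro get_common_intro_alt
  have h := foldl_sim Phi
    (fun (st : List Int × List (Int × Int)) i =>
      (List.range l2.length).foldl (fun st j =>
        let cur := runA l1 l2 i j 0
        if cur.1.length > st.1.length then cur else st) st)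
    (fun (st : Nat × Nat × Nat) i =>
      (List.range l2.length).foldl (fun st j =>
        let v := ((dpRows l2 l1).getD i []).getD j 0
        if v > st.1 then (v, i, j) else st) st)
    (List.range l1.length)
    (fun a b i hi hab =>
      foldl_sim Phi _ _ (List.range l2.length)
        (fun a b j _ hab =>
          inner_step l1 l2 i (le_of_lt (List.mem_range.mp hi)) a b j hab)
        a b hab)
    ([], []) (0, 0, 0) ⟨rfl, by simp [mkOut]⟩
  exact h.2
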